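-- pv_equiv track=rewrite | github.com/OrangaKenneth/first-year | 1_ps3/document_distance.py | get_most_frequent_words
-- ===== SOURCE A (Python) =====
-- def get_most_frequent_words(dict1, dict2):
--     """
--     The keys of dict1 and dict2 are all lowercase,
--     you will NOT need to worry about case sensitivity.
--
--     Args:
--         dict1: frequency dictionary for one text
--         dict2: frequency dictionary for another text
--     Returns:
--         list of the most frequent word(s) in the input dictionaries
--
--     The most frequent word:
--         * is based on the combined word frequencies across both dictionaries.
--           If a word occurs in both dictionaries, consider the sum the
--           frequencies as the combined word frequency.
--         * need not be in both dictionaries, i.e it can be exclusively in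
--           dict1, dict2, or shared by dict1 and dict2.
--     If multiple words are tied (i.e. share the same highest frequency),
--     return an alphabetically ordered list of all these words.
--     """
--     if len(dict1)>=len(dict2):
--         a,b = dict1,dict2
--     else:
--         a,b = dict2, dict1
--     for wrd in b:
--         #iterates over the samllest dict and adds similar word freqs and non-similar words to larger dict : a
--         if wrd in a:
--             keya = a[wrd]
--             keyb = b[wrd]
--             a[wrd]= keya+keyb
--         else:
--             a[wrd]=b[wrd]
--     most_frq = max(a.values()) #gets the maximum freq
--     frq_wrd_lst = [x for x in a if a[x]==most_frq]#iterates over larger dict to get the keys that have the max req and adds them to a list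
--     return frq_wrd_lst
-- ===== SOURCE B (Python) =====
-- def get_most_frequent_words(dict1, dict2):
--     # Bucket-by-frequency approach: combine counts into a fresh dict (seeded from the
--     # larger input so word order matches A's merged order), then group words by their
--     # frequency in one pass and return the bucket at the maximum frequency.
--     # Unlike A, this does not mutate either input dict (return value is identical).
--     if len(dict1) >= len(dict2):
--         big, small = dict1, dict2
--     else:
--         big, small = dict2, dict1
--     merged = dict(big)
--     for wrd, cnt in small.items():
--         merged[wrd] = merged.get(wrd, 0) + cnt
--     buckets = {}
--     for wrd, cnt in merged.items():
--         buckets.setdefault(cnt, []).append(wrd)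
--     return buckets[max(buckets)]
-- ===== Notes on version B (the rewrite author's own statement) =====
-- stated objective: alternative
-- what changed: A scans the merged dict twice (max() over all values, then a comprehension filtering keys by that maximum); B instead groups words into a frequency->words bucket dict in one pass over the merged items and returns the bucket at the maximum frequency key; B also merges into a fresh dict instead of mutating the larger input in place (return value unchanged).
import Mathlib
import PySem

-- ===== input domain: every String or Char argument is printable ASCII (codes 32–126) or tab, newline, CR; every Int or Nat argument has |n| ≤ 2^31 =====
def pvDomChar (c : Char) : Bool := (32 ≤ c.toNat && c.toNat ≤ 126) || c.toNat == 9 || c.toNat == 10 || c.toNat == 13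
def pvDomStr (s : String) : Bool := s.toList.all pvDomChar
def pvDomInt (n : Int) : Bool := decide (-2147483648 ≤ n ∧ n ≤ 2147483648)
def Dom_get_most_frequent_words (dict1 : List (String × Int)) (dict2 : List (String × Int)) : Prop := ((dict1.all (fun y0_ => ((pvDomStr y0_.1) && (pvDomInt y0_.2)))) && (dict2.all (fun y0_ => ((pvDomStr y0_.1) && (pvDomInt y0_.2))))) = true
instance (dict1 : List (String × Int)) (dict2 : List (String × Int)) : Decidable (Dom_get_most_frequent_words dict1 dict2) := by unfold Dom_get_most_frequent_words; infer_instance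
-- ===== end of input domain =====

-- B replaces A's max()-then-filter tail by grouping words into a frequency→words bucket dict and
-- returning the bucket at the maximum frequency; return-value equivalence only — A mutates the
-- larger input dict in place, B builds a fresh merged dict.


-- ===== PORT A =====
def get_most_frequent_words (dict1 : List (String × Int)) (dict2 : List (String × Int)) : List String :=
  let d1 : PySem.Dict String Int := PySem.Dict.ofList dict1
  let d2 : PySem.Dict String Int := PySem.Dict.ofList dict2
  let ab := if d2.size ≤ d1.size then (d1, d2) else (d2, d1)
  -- for wrd in b: …
  let a := ab.2.items.foldl (fun a p =>
      if a.contains p.1 then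
        let keya := a.getD p.1 0      -- keya = a[wrd] (the key is present)
        let keyb := p.2               -- keyb = b[wrd]
        a.insert p.1 (keya + keyb)
      else
        a.insert p.1 p.2) ab.1
  -- most_frq = max(a.values());  raises ValueError when a is empty (excluded by Pre_)
  match PySem.List.max? a.values (fun y => y) with
  | none => []
  | some most_frq => a.keys.filter (fun x => a.getD x 0 == most_frq)

-- ===== PORT B =====
def get_most_frequent_words_alt (dict1 : List (String × Int)) (dict2 : List (String × Int)) : List String :=
  let d1 : PySem.Dict String Int := PySem.Dict.ofList dict1
  let d2 : PySem.Dict String Int := PySem.Dict.ofList dict2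
  let bs := if d2.size ≤ d1.size then (d1, d2) else (d2, d1)
  -- merged = dict(big); for wrd, cnt in small.items(): merged[wrd] = merged.get(wrd, 0) + cnt
  let merged := bs.2.items.foldl (fun m p => m.insert p.1 (m.getD p.1 0 + p.2))
      (PySem.Dict.ofList bs.1.items)
  -- for wrd, cnt in merged.items(): buckets.setdefault(cnt, []).append(wrd)
  let buckets := merged.items.foldl
      (fun (bk : PySem.Dict Int (List String)) p => bk.modify p.2 [] (fun l => l ++ [p.1]))
      PySem.Dict.empty
  -- buckets[max(buckets)];  max() raises ValueError when buckets is empty (excluded by Pre_)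
  match PySem.List.max? buckets.keys (fun y => y) with
  | none => []
  | some m => buckets.getD m []

-- ===== PRECONDITION & SPEC =====
-- Pre_ excludes only the input where both dicts are empty: there A's max() raises ValueError (B's max() raises too).
def Pre_get_most_frequent_words (dict1 : List (String × Int)) (dict2 : List (String × Int)) : Prop :=
  ¬ (dict1 = [] ∧ dict2 = [])
instance (dict1 : List (String × Int)) (dict2 : List (String × Int)) : Decidable (Pre_get_most_frequent_words dict1 dict2) := by unfold Pre_get_most_frequent_words; infer_instance
def pvWitness_get_most_frequent_words : (List (String × Int)) × (List (String × Int)) :=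
  ([("a", 2), ("b", 2)], [("c", 1)])

def Spec_get_most_frequent_words (dict1 : List (String × Int)) (dict2 : List (String × Int)) (out : List String) : Prop := out = get_most_frequent_words_alt dict1 dict2
instance (dict1 : List (String × Int)) (dict2 : List (String × Int)) (out : List String) : Decidable (Spec_get_most_frequent_words dict1 dict2 out) := by unfold Spec_get_most_frequent_words; infer_instance

-- ===== CLAIM (what is proved, stated in full; the proofs are below) =====
def Claim_equal_get_most_frequent_words : Prop := ∀ (dict1 : List (String × Int)) (dict2 : List (String × Int)), Dom_get_most_frequent_words dict1 dict2 → Pre_get_most_frequent_words dict1 dict2 → Spec_get_most_frequent_words dict1 dict2 (get_most_frequent_words dict1 dict2)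

-- ===== LEMMAS AND PROOFS =====

-- the two merge loops are the same function
lemma merge_fun_eq :
    (fun (a : PySem.Dict String Int) (p : String × Int) =>
      if a.contains p.1 then
        let keya := a.getD p.1 0
        let keyb := p.2
        a.insert p.1 (keya + keyb)
      else
        a.insert p.1 p.2)
    = (fun (a : PySem.Dict String Int) (p : String × Int) => a.insert p.1 (a.getD p.1 0 + p.2)) := by
  funext a p
  by_cases h : a.contains p.1 = true
  · simp [h]
  · simp only [Bool.not_eq_true] at h
    rw [if_neg (by simp [h]), PySem.Dict.getD_of_not_contains a 0 h, zero_add]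

-- dict(d) rebuilt from its items is d again (keys are unique)
lemma ofList_items_self (d : PySem.Dict String Int) (hnd : d.keys.Nodup) :
    PySem.Dict.ofList d.items = d := by
  apply PySem.Dict.ext
  have h := PySem.Dict.items_foldl_insert_fresh (l := d.items) (k := Prod.fst) (v := Prod.snd)
      (d := (PySem.Dict.empty : PySem.Dict String Int))
      (by intro a _; exact PySem.Dict.contains_empty a.1)
      (by simpa [PySem.Dict.keys] using hnd)
  simpa [show (PySem.Dict.empty : PySem.Dict String Int).items = [] from rfl] using h

-- the running max of a list is an element of it
lemma foldl_max_mem (x : Int) (l : List Int) : l.foldl max x ∈ x :: l := by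
  induction l generalizing x with
  | nil => simp
  | cons y t ih =>
    rcases List.mem_cons.mp (ih (max x y)) with h | h
    · rw [List.foldl_cons, h]
      rcases max_choice x y with hm | hm <;> simp [hm]
    · simp [List.foldl_cons, h]

-- A's key-filter over a nodup-keyed dict is the pair-filter over its items
lemma keys_filter_eq (a : PySem.Dict String Int) (hnd : a.keys.Nodup) (m : Int) :
    a.keys.filter (fun x => a.getD x 0 == m)
      = (a.items.filter (fun p => p.2 == m)).map Prod.fst := by
  have hkeys : a.keys = a.items.map Prod.fst := by simp [PySem.Dict.keys]
  rw [hkeys, List.filter_map]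
  congr 1
  apply List.filter_congr
  intro p hp
  obtain ⟨k, v⟩ := p
  have : a.getD k 0 = v := PySem.Dict.getD_of_mem_items a hp hnd 0
  simp [Function.comp, this]

-- inserting never empties a dict, so insert loops keep the dict nonempty
lemma items_foldl_insert_ne_nil (f : PySem.Dict String Int → String × Int → Int)
    (l : List (String × Int)) (a : PySem.Dict String Int) (h : a.items ≠ []) :
    (l.foldl (fun d (p : String × Int) => d.insert p.1 (f d p)) a).items ≠ [] := by
  induction l generalizing a with
  | nil => exact h
  | cons q t ih =>
    rw [List.foldl_cons]
    apply ih
    rw [PySem.Dict.items_insert]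
    by_cases hc : a.contains q.1 = true
    · simp [hc]; intro hcon; exact h hcon
    · simp only [Bool.not_eq_true] at hc
      simp [hc]

lemma ofList_items_ne_nil (l : List (String × Int)) (h : l ≠ []) :
    (PySem.Dict.ofList l : PySem.Dict String Int).items ≠ [] := by
  obtain ⟨p, t, rfl⟩ := List.exists_cons_of_ne_nil h
  have hof : (PySem.Dict.ofList (p :: t) : PySem.Dict String Int)
      = t.foldl (fun d (q : String × Int) => d.insert q.1 q.2) (PySem.Dict.empty.insert p.1 p.2) := rfl
  rw [hof]
  have : (PySem.Dict.empty.insert p.1 p.2 : PySem.Dict String Int).items ≠ [] := by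
    rw [PySem.Dict.items_insert]
    simp [PySem.Dict.contains_empty]
  exact items_foldl_insert_ne_nil (fun _ q => q.2) t _ this

-- B's bucket dict, characterized: its keys' maximum is the values' maximum,
-- and its bucket at any frequency is the filtered word list.
lemma buckets_getD (a : PySem.Dict String Int) (m : Int) :
    (a.items.foldl
      (fun (bk : PySem.Dict Int (List String)) p => bk.modify p.2 [] (fun l => l ++ [p.1]))
      PySem.Dict.empty).getD m []
    = (a.items.filter (fun p => p.2 == m)).map Prod.fst := by
  have hswap : a.items.foldl
      (fun (bk : PySem.Dict Int (List String)) p => bk.modify p.2 [] (fun l => l ++ [p.1]))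
      PySem.Dict.empty
      = (a.items.map Prod.swap).foldl
        (fun (bk : PySem.Dict Int (List String)) p => bk.modify p.1 [] (fun l => l ++ [p.2]))
        PySem.Dict.empty := by
    rw [List.foldl_map]
    simp only [Prod.fst_swap, Prod.snd_swap]
  rw [hswap, PySem.Dict.getD_foldl_modify_append, PySem.Dict.getD_empty, List.nil_append,
    List.filter_map, List.map_map]
  rfl

lemma buckets_keys (a : PySem.Dict String Int) :
    (a.items.foldl
      (fun (bk : PySem.Dict Int (List String)) p => bk.modify p.2 [] (fun l => l ++ [p.1]))
      PySem.Dict.empty).keys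
    = PySem.Set.ofList a.values := by
  have h := PySem.Dict.keys_foldl_modify_key (l := a.items) (key := Prod.snd) (d0 := ([] : List String))
      (f := fun _ p l => l ++ [p.1]) (d := (PySem.Dict.empty : PySem.Dict Int (List String)))
  simp only [PySem.Dict.keys_empty, PySem.Set.update_nil_left] at h
  exact h

-- max over the distinct frequencies = max over all frequencies
lemma max_ofList_values (a : PySem.Dict String Int) (q : String × Int) (t : List (String × Int))
    (hqt : a.items = q :: t) :
    PySem.List.max? (PySem.Set.ofList a.values) (fun y => y)
      = some ((t.map Prod.snd).foldl max q.2) := by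
  have hvals : a.values = q.2 :: t.map Prod.snd := by simp [PySem.Dict.values, hqt]
  set M := (t.map Prod.snd).foldl max q.2 with hM
  have hMmem : M ∈ a.values := by
    rw [hvals]; exact foldl_max_mem q.2 (t.map Prod.snd)
  have hMmax : ∀ y ∈ a.values, y ≤ M := by
    have := PySem.List.max?_isMax (xs := a.values) (key := fun y => y) (m := M)
      (by rw [hvals, PySem.List.max?_id_cons])
    exact this
  have hne : PySem.Set.ofList a.values ≠ [] := by
    intro hcon
    have : M ∈ PySem.Set.ofList a.values := (PySem.Set.mem_ofList _ _).mpr hMmem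
    rw [hcon] at this; exact absurd this (List.not_mem_nil)
  obtain ⟨m, hm⟩ : ∃ m, PySem.List.max? (PySem.Set.ofList a.values) (fun y => y) = some m := by
    cases hx : PySem.List.max? (PySem.Set.ofList a.values) (fun y => y) with
    | none => exact absurd ((PySem.List.max?_eq_none_iff _ _).mp hx) hne
    | some m => exact ⟨m, rfl⟩
  rw [hm]
  have h1 : m ≤ M := hMmax m ((PySem.Set.mem_ofList _ _).mp (PySem.List.max?_mem hm))
  have h2 : M ≤ m := PySem.List.max?_isMax hm M ((PySem.Set.mem_ofList _ _).mpr hMmem)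
  exact congrArg some (le_antisymm h1 h2)

-- main tail lemma: on a nonempty nodup-keyed merged dict the two tails agree
lemma tails_agree (a : PySem.Dict String Int) (hnd : a.keys.Nodup) (hne : a.items ≠ []) :
    (match PySem.List.max? a.values (fun y => y) with
      | none => []
      | some most_frq => a.keys.filter (fun x => a.getD x 0 == most_frq))
    = (match PySem.List.max?
        ((a.items.foldl
          (fun (bk : PySem.Dict Int (List String)) p => bk.modify p.2 [] (fun l => l ++ [p.1]))
          PySem.Dict.empty).keys) (fun y => y) with
      | none => []
      | some m => (a.items.foldl
          (fun (bk : PySem.Dict Int (List String)) p => bk.modify p.2 [] (fun l => l ++ [p.1]))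
          PySem.Dict.empty).getD m []) := by
  obtain ⟨q, t, hqt⟩ := List.exists_cons_of_ne_nil hne
  have hvals : a.values = q.2 :: t.map Prod.snd := by simp [PySem.Dict.values, hqt]
  have hmaxA : PySem.List.max? a.values (fun y => y) = some ((t.map Prod.snd).foldl max q.2) := by
    rw [hvals, PySem.List.max?_id_cons]
  have hmaxB := max_ofList_values a q t hqt
  rw [hmaxA, buckets_keys, hmaxB]
  show List.filter (fun x => a.getD x 0 == List.foldl max q.2 (List.map Prod.snd t)) a.keys
      = (List.foldl (fun bk p => bk.modify p.2 [] fun l => l ++ [p.1]) PySem.Dict.empty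
          a.items).getD (List.foldl max q.2 (List.map Prod.snd t)) []
  rw [buckets_getD, keys_filter_eq a hnd]

-- ===== VERDICT (by name: the statement is the Claim_ definition above) =====
theorem get_most_frequent_words_spec : Claim_equal_get_most_frequent_words := by
  intro dict1 dict2 _ hpre
  unfold Spec_get_most_frequent_words
  simp only [get_most_frequent_words, get_most_frequent_words_alt]
  rw [merge_fun_eq]
  set d1 : PySem.Dict String Int := PySem.Dict.ofList dict1 with hd1
  set d2 : PySem.Dict String Int := PySem.Dict.ofList dict2 with hd2
  set ab := if d2.size ≤ d1.size then (d1, d2) else (d2, d1) with hab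
  have hnd1 : ab.1.keys.Nodup := by
    rw [hab]
    by_cases h : d2.size ≤ d1.size
    · rw [if_pos h]; exact PySem.Dict.nodup_keys_ofList dict1
    · rw [if_neg h]; exact PySem.Dict.nodup_keys_ofList dict2
  rw [ofList_items_self ab.1 hnd1]
  set a := ab.2.items.foldl (fun a p => a.insert p.1 (a.getD p.1 0 + p.2)) ab.1 with ha
  have hnd : a.keys.Nodup := by
    rw [ha]
    exact PySem.Dict.nodup_keys_foldl_insert_key _ _ _ _ hnd1
  have hne : a.items ≠ [] := by
    rw [ha]
    apply items_foldl_insert_ne_nil (fun d p => d.getD p.1 0 + p.2)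
    have h12 : dict1 ≠ [] ∨ dict2 ≠ [] := by
      by_cases h : dict1 = []
      · right; intro h2; exact hpre ⟨h, h2⟩
      · left; exact h
    by_cases hc : d2.size ≤ d1.size
    · have hab1 : ab.1 = d1 := by rw [hab, if_pos hc]
      rw [hab1]
      rcases h12 with h | h
      · exact ofList_items_ne_nil dict1 h
      · have h2 := ofList_items_ne_nil dict2 h
        have h2' : 0 < d2.items.length := List.length_pos_of_ne_nil h2
        have hc' : d2.items.length ≤ d1.items.length := by
          simpa [PySem.Dict.size] using hc
        intro hcon
        rw [hcon] at hc'
        simp at hc'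
        exact h2 hc'
    · have hab1 : ab.1 = d2 := by rw [hab, if_neg hc]
      rw [hab1]
      rcases h12 with h | h
      · have h1 := ofList_items_ne_nil dict1 h
        have h1' : 0 < d1.items.length := List.length_pos_of_ne_nil h1
        have hc' : d1.items.length < d2.items.length := by
          simpa [PySem.Dict.size] using Nat.lt_of_not_le hc
        intro hcon
        rw [hcon] at hc'
        simp at hc'
      · exact ofList_items_ne_nil dict2 h
  exact tails_agree a hnd hne
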